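-- pv_equiv track=rewrite | github.com/lan496/dsenum | dsenum/polya.py | polya_counting
-- ===== SOURCE A (Python) =====
-- from typing import List
--
-- def polya_counting(permutation_group: List[List[int]], num_color: int) -> int:
--     """
--     count the number of coloring with num_color kinds of colors and permutations
--
--     Parameters
--     ----------
--     permutation_group:
--         the i-th permutation permutation_group[i] permutes j to permutation_group[i][j]
--         for j = 0,...,len(permutation_group[0])-1
--
--     Returns
--     -------
--     cnt: int
--     """
--     cnt = 0
--     for perm in permutation_group:
--         type_of_perm = get_type_of_permutation(perm)
--         cnt += num_color ** sum(type_of_perm)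
--
--     assert cnt % len(permutation_group) == 0
--     cnt //= len(permutation_group)
--     return cnt
--
-- def get_type_of_permutation(permutation: List[int]):
--     num_elements = len(permutation)
--     type_of_perm = [0 for _ in range(num_elements)]
--
--     flags = [False for _ in range(num_elements)]
--     for i in range(num_elements):
--         if flags[i]:
--             continue
--         flags[i] = True
--         pos = permutation[i]
--         cnt = 1
--         while pos != i:
--             flags[pos] = True
--             pos = permutation[pos]
--             cnt += 1
--
--         type_of_perm[cnt - 1] += 1
--
--     return type_of_perm
-- ===== SOURCE B (Python) =====
-- from typing import List
--
-- def polya_counting(permutation_group: List[List[int]], num_color: int) -> int: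
--     cnt = 0
--     for perm in permutation_group:
--         # number of cycles = number of indices that are the minimum of their cycle
--         cycles = 0
--         for j in range(len(perm)):
--             pos = perm[j]
--             while pos > j:
--                 pos = perm[pos]
--             if pos == j:
--                 cycles += 1
--         cnt += num_color ** cycles
--
--     assert cnt % len(permutation_group) == 0
--     cnt //= len(permutation_group)
--     return cnt
-- ===== Notes on version B (the rewrite author's own statement) =====
-- stated objective: simpler
-- what changed: Replaces the flags array + cycle-type histogram (mark every element of each cycle, bump type_of_perm[len-1], then sum) by a stateless cycle-leader count: an index is counted iff following the permutation from it returns to it before reaching any smaller index, so no auxiliary arrays are built at all.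
-- outside the precondition, e.g. on polya_counting([[-1, 0]], 2): A returns 2, B returns 1
import Mathlib
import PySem

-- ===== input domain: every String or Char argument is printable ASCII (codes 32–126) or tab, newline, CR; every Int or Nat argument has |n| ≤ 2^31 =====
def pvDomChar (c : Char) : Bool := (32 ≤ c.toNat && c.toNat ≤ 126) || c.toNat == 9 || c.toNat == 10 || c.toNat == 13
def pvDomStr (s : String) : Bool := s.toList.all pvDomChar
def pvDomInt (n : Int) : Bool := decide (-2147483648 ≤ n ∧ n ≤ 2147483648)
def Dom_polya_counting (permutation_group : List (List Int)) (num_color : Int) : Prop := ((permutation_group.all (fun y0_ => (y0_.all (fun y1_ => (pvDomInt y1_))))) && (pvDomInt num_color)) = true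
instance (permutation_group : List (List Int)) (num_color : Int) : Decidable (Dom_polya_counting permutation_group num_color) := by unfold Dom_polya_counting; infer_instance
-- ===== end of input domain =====

-- B replaces A's flags array + cycle-type histogram by a stateless cycle-leader count (an index is
-- counted iff the walk from it returns before reaching a smaller index) — objective: simpler.

-- ===== PORT A =====
-- inner 'while pos != i' loop of get_type_of_permutation; fuel = len(permutation) is enough for the
-- genuine permutations Pre_ admits (a cycle has at most n elements); '.toNat' on indices is exact
-- there because all entries are nonnegative.
def pvWalkA (p : List Int) (i : Int) : Nat → List Bool → Int → Int → List Bool × Int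
  | 0, flags, _, cnt => (flags, cnt)
  | fuel+1, flags, pos, cnt =>
      if pos = i then (flags, cnt)
      else pvWalkA p i fuel (flags.set pos.toNat true) (PySem.List.pyGetD p pos 0) (cnt + 1)

-- the body of get_type_of_permutation's 'for i in range(num_elements)' loop
def pvStepA (p : List Int) (st : List Bool × List Int) (i : Nat) : List Bool × List Int :=
  if st.1.getD i false then st
  else
    let flags := st.1.set i true
    let pos := PySem.List.pyGetD p (i : Int) 0
    let r := pvWalkA p (i : Int) p.length flags pos 1
    (r.1, st.2.set (r.2 - 1).toNat (st.2.getD (r.2 - 1).toNat 0 + 1))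

-- get_type_of_permutation
def pvTypeOfPerm (p : List Int) : List Int :=
  ((List.range p.length).foldl (pvStepA p)
    (List.replicate p.length false, List.replicate p.length 0)).2

-- the exponent sum(type_of_perm) is a sum of nonnegative counters, so '.toNat' is exact;
-- the assert is not ported: Pre_ admits exactly the inputs on which it passes.
def polya_counting (permutation_group : List (List Int)) (num_color : Int) : Int :=
  let cnt := permutation_group.foldl
    (fun acc perm => acc + num_color ^ ((pvTypeOfPerm perm).sum.toNat)) 0
  PySem.Int.floordiv cnt (permutation_group.length)

-- ===== PORT B =====
-- inner 'while pos > j' loop of Source B; fuel = len(perm) is enough inside Pre_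
def pvWalkB (p : List Int) (j : Int) : Nat → Int → Int
  | 0, pos => pos
  | fuel+1, pos => if j < pos then pvWalkB p j fuel (PySem.List.pyGetD p pos 0) else pos

def polya_counting_alt (permutation_group : List (List Int)) (num_color : Int) : Int :=
  let cnt := permutation_group.foldl
    (fun acc perm =>
      let cycles := (List.range perm.length).foldl
        (fun (cy : Int) (j : Nat) =>
          if pvWalkB perm (j : Int) perm.length (PySem.List.pyGetD perm (j : Int) 0) = (j : Int)
          then cy + 1 else cy)
        (0 : Int)
      acc + num_color ^ cycles.toNat)
    0
  PySem.Int.floordiv cnt (permutation_group.length)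

-- ===== PRECONDITION & SPEC =====
-- the permutation read as a function on indices
def pvF (p : List Int) (k : Nat) : Nat := (p.getD k 0).toNat

-- 'j is the minimum of its cycle': every iterate within n steps is ≥ j
def pvMinRep (p : List Int) (j : Nat) : Bool :=
  (List.range (p.length + 1)).all (fun t => j ≤ (pvF p)^[t] j)

-- the number of cycles of a permutation = the number of cycle minima
def pvCycles (p : List Int) : Int :=
  ((List.range p.length).filter (fun j => pvMinRep p j)).length

def pvValidPerm (p : List Int) : Bool :=
  p.all (fun x => decide (0 ≤ x) && decide (x < (p.length : Int))) && decide p.Nodup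

-- Pre_ restricts to the natural domain — a nonempty list of genuine permutations of 0..len-1 on
-- which the assert passes.  Outside it Python A raises (ZeroDivisionError on [], AssertionError
-- when the divisibility fails, IndexError on too-large entries) or diverges on most
-- non-permutations; on some lists with negative entries A instead returns a value via Python's
-- negative-index wraparound (an artefact of indexing flags/perm with a negative pos; see the
-- claim's cites), and those lists are excluded here as outside the function's stated domain.
def Pre_polya_counting (permutation_group : List (List Int)) (num_color : Int) : Prop :=
  permutation_group ≠ [] ∧ (∀ p ∈ permutation_group, pvValidPerm p = true) ∧
  PySem.Int.mod
    (permutation_group.foldl (fun acc perm => acc + num_color ^ (pvCycles perm).toNat) 0)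
    permutation_group.length = 0
instance (permutation_group : List (List Int)) (num_color : Int) : Decidable (Pre_polya_counting permutation_group num_color) := by unfold Pre_polya_counting; infer_instance

def pvWitness_polya_counting : List (List Int) × Int := ([[1, 0], [0, 1]], 2)

def Spec_polya_counting (permutation_group : List (List Int)) (num_color : Int) (out : Int) : Prop := out = polya_counting_alt permutation_group num_color
instance (permutation_group : List (List Int)) (num_color : Int) (out : Int) : Decidable (Spec_polya_counting permutation_group num_color out) := by unfold Spec_polya_counting; infer_instance

-- ===== CLAIM (what is proved, stated in full; the proofs are below) =====
def Claim_equal_polya_counting : Prop := ∀ (permutation_group : List (List Int)) (num_color : Int), Dom_polya_counting permutation_group num_color → Pre_polya_counting permutation_group num_color → Spec_polya_counting permutation_group num_color (polya_counting permutation_group num_color)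

-- ===== LEMMAS AND PROOFS =====

-- x is reachable from j by iterating the permutation
def pvInOrb (p : List Int) (j x : Nat) : Prop := ∃ s, (pvF p)^[s] j = x

theorem pvValid_mem {p : List Int} (hv : pvValidPerm p = true) :
    ∀ x ∈ p, 0 ≤ x ∧ x < (p.length : Int) := by
  simp [pvValidPerm, List.all_eq_true] at hv
  exact fun x hx => hv.1 x hx
theorem pvValid_nodup {p : List Int} (hv : pvValidPerm p = true) : p.Nodup := by
  simp [pvValidPerm] at hv; exact hv.2
theorem pvF_lt {p : List Int} (hv : pvValidPerm p = true) {k : Nat} (hk : k < p.length) :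
    pvF p k < p.length := by
  have h := pvValid_mem hv (p.getD k 0) (by rw [List.getD_eq_getElem p 0 hk]; exact p.getElem_mem hk)
  unfold pvF; omega
theorem pvF_cast {p : List Int} (hv : pvValidPerm p = true) {k : Nat} (hk : k < p.length) :
    p.getD k 0 = ((pvF p k : Nat) : Int) := by
  have h := pvValid_mem hv (p.getD k 0) (by rw [List.getD_eq_getElem p 0 hk]; exact p.getElem_mem hk)
  unfold pvF; omega
theorem pvF_inj {p : List Int} (hv : pvValidPerm p = true) {a b : Nat}
    (ha : a < p.length) (hb : b < p.length) (h : pvF p a = pvF p b) : a = b := by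
  have h1 := pvValid_mem hv (p.getD a 0) (by rw [List.getD_eq_getElem p 0 ha]; exact p.getElem_mem ha)
  have h2 := pvValid_mem hv (p.getD b 0) (by rw [List.getD_eq_getElem p 0 hb]; exact p.getElem_mem hb)
  have : p.getD a 0 = p.getD b 0 := by unfold pvF at h; omega
  rw [List.getD_eq_getElem p 0 ha, List.getD_eq_getElem p 0 hb] at this
  exact (List.Nodup.getElem_inj_iff (pvValid_nodup hv)).mp this
theorem pvIter_lt {p : List Int} (hv : pvValidPerm p = true) {j : Nat} (hj : j < p.length) :
    ∀ t, (pvF p)^[t] j < p.length := by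
  intro t
  induction t with
  | zero => simpa using hj
  | succ t ih => rw [Function.iterate_succ_apply']; exact pvF_lt hv ih
theorem pvIter_cancel {p : List Int} (hv : pvValidPerm p = true) :
    ∀ (a : Nat) (x y : Nat), x < p.length → y < p.length →
      (pvF p)^[a] x = (pvF p)^[a] y → x = y := by
  intro a
  induction a with
  | zero => intro x y _ _ h; simpa using h
  | succ a ih =>
    intro x y hx hy h
    rw [Function.iterate_succ_apply', Function.iterate_succ_apply'] at h
    exact ih x y hx hy (pvF_inj hv (pvIter_lt hv hx a) (pvIter_lt hv hy a) h)
theorem pvExists_ret {p : List Int} (hv : pvValidPerm p = true) {j : Nat} (hj : j < p.length) :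
    ∃ t, 0 < t ∧ t ≤ p.length ∧ (pvF p)^[t] j = j := by
  have hmaps : ∀ t ∈ Finset.range (p.length + 1), (pvF p)^[t] j ∈ Finset.range p.length := by
    intro t _; exact Finset.mem_range.mpr (pvIter_lt hv hj t)
  have hcard : (Finset.range p.length).card < (Finset.range (p.length + 1)).card := by
    simp
  obtain ⟨a, ha, b, hb, hne, heq⟩ :=
    Finset.exists_ne_map_eq_of_card_lt_of_maps_to hcard hmaps
  simp only [Finset.mem_range] at ha hb
  rcases Nat.lt_or_ge a b with hab | hab
  · refine ⟨b - a, by omega, by omega, ?_⟩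
    have : (pvF p)^[a] ((pvF p)^[b-a] j) = (pvF p)^[a] j := by
      rw [← Function.iterate_add_apply]
      rw [show a + (b - a) = b by omega]
      exact heq.symm
    exact pvIter_cancel hv a _ _ (pvIter_lt hv hj _) hj this
  · have hba : b < a := by omega
    refine ⟨a - b, by omega, by omega, ?_⟩
    have : (pvF p)^[b] ((pvF p)^[a-b] j) = (pvF p)^[b] j := by
      rw [← Function.iterate_add_apply]
      rw [show b + (a - b) = a by omega]
      exact heq
    exact pvIter_cancel hv b _ _ (pvIter_lt hv hj _) hj this
theorem pvIter_mul_fix {p : List Int} {j m : Nat} (hfix : (pvF p)^[m] j = j) :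
    ∀ q, (pvF p)^[q * m] j = j := by
  intro q
  induction q with
  | zero => simp
  | succ q ih =>
    rw [show (q + 1) * m = m + q * m by ring, Function.iterate_add_apply, ih, hfix]
theorem pvIter_mod {p : List Int} {j m : Nat} (hm : 0 < m) (hfix : (pvF p)^[m] j = j) :
    ∀ t, (pvF p)^[t] j = (pvF p)^[t % m] j := by
  intro t
  conv_lhs => rw [show t = t % m + t / m * m from (Nat.mod_add_div' t m).symm]
  rw [Function.iterate_add_apply, pvIter_mul_fix hfix]
theorem pvMinRep_iff {p : List Int} {j : Nat} :
    pvMinRep p j = true ↔ ∀ t ≤ p.length, j ≤ (pvF p)^[t] j := by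
  simp [pvMinRep, List.all_eq_true]
theorem pvStop {p : List Int} (hv : pvValidPerm p = true) {j : Nat} (hj : j < p.length) :
    ∃ a, 0 < a ∧ a ≤ p.length ∧ (pvF p)^[a] j ≤ j ∧
      (∀ t, 0 < t → t < a → j < (pvF p)^[t] j) ∧
      ((pvF p)^[a] j = j ↔ pvMinRep p j = true) := by
  obtain ⟨m, hm0, hmn, hmfix⟩ := pvExists_ret hv hj
  have hex : ∃ t, 0 < t ∧ (pvF p)^[t] j ≤ j := ⟨m, hm0, le_of_eq hmfix⟩
  classical
  have haspec := Nat.find_spec hex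
  have hamin : ∀ t, t < Nat.find hex → ¬(0 < t ∧ (pvF p)^[t] j ≤ j) := fun t ht => Nat.find_min hex ht
  have ham : Nat.find hex ≤ m := Nat.find_min' hex ⟨hm0, le_of_eq hmfix⟩
  generalize hgen : Nat.find hex = a at haspec hamin ham
  refine ⟨a, haspec.1, le_trans ham hmn, haspec.2, ?_, ?_⟩
  · intro t ht hta
    have := hamin t hta
    omega
  · constructor
    · intro hfa
      rw [pvMinRep_iff]
      intro t _
      rw [pvIter_mod haspec.1 hfa t]
      rcases Nat.eq_zero_or_pos (t % a) with h0 | h0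
      · rw [h0]; simp
      · exact le_of_lt ((by
          have := hamin (t % a) (Nat.mod_lt t haspec.1)
          omega : j < (pvF p)^[t % a] j))
    · intro hmr
      have := (pvMinRep_iff.mp hmr) a (le_trans ham hmn)
      omega
theorem pvInOrb_refl (p : List Int) (j : Nat) : pvInOrb p j j := ⟨0, rfl⟩
theorem pvInOrb_trans {p : List Int} {j k x : Nat} (h1 : pvInOrb p j k) (h2 : pvInOrb p k x) :
    pvInOrb p j x := by
  obtain ⟨s1, hs1⟩ := h1
  obtain ⟨s2, hs2⟩ := h2
  exact ⟨s2 + s1, by rw [Function.iterate_add_apply, hs1, hs2]⟩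
theorem pvInOrb_symm {p : List Int} (hv : pvValidPerm p = true) {j x : Nat} (hj : j < p.length)
    (h : pvInOrb p j x) : pvInOrb p x j := by
  obtain ⟨s, hs⟩ := h
  obtain ⟨m, hm0, _, hmfix⟩ := pvExists_ret hv hj
  refine ⟨(s / m + 1) * m - s, ?_⟩
  rw [← hs, ← Function.iterate_add_apply]
  rw [show (s / m + 1) * m - s + s = (s / m + 1) * m by
    have h1 := Nat.mod_add_div' s m
    have h2 := Nat.mod_lt s hm0
    have h3 : (s / m + 1) * m = s / m * m + m := by ring
    omega]
  exact pvIter_mul_fix hmfix _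
theorem pvNotMinRep_iff {p : List Int} (hv : pvValidPerm p = true) {j : Nat} (hj : j < p.length) :
    pvMinRep p j = false ↔ ∃ x, x < j ∧ pvInOrb p j x := by
  constructor
  · intro hmr
    have : ¬ (∀ t ≤ p.length, j ≤ (pvF p)^[t] j) := by
      rw [← pvMinRep_iff]; simp [hmr]
    push_neg at this
    obtain ⟨t, _, ht2⟩ := this
    exact ⟨(pvF p)^[t] j, ht2, ⟨t, rfl⟩⟩
  · rintro ⟨x, hxj, s, hs⟩
    obtain ⟨m, hm0, hmn, hmfix⟩ := pvExists_ret hv hj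
    rw [Bool.eq_false_iff]
    intro hmr
    have := pvMinRep_iff.mp hmr (s % m) (le_of_lt (lt_of_lt_of_le (Nat.mod_lt s hm0) hmn))
    rw [← pvIter_mod hm0 hmfix s, hs] at this
    omega
theorem pvWalkB_run {p : List Int} (hv : pvValidPerm p = true) {j a : Nat} (hj : j < p.length)
    (ha0 : 0 < a) (hstop : (pvF p)^[a] j ≤ j) (hbet : ∀ t, 0 < t → t < a → j < (pvF p)^[t] j) :
    ∀ (fuel t : Nat), 0 < t → t ≤ a → a - t ≤ fuel →
      pvWalkB p (j : Int) fuel (((pvF p)^[t] j : Nat) : Int) = (((pvF p)^[a] j : Nat) : Int) := by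
  intro fuel
  induction fuel with
  | zero =>
    intro t ht0 hta hf
    have : t = a := by omega
    subst this; rfl
  | succ fuel ih =>
    intro t ht0 hta hf
    rcases eq_or_lt_of_le hta with he | hlt
    · subst he
      simp only [pvWalkB]
      rw [if_neg (by exact_mod_cast not_lt.mpr hstop)]
    · have hgt := hbet t ht0 hlt
      simp only [pvWalkB]
      rw [if_pos (by exact_mod_cast hgt)]
      have hlt_n : (pvF p)^[t] j < p.length := pvIter_lt hv hj t
      rw [PySem.List.pyGetD_natCast, pvF_cast hv hlt_n,
        show pvF p ((pvF p)^[t] j) = (pvF p)^[t+1] j from (Function.iterate_succ_apply' _ _ _).symm]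
      exact ih (t+1) (by omega) hlt (by omega)
theorem pvWalkB_minrep {p : List Int} (hv : pvValidPerm p = true) {j : Nat} (hj : j < p.length) :
    (pvWalkB p (j : Int) p.length (PySem.List.pyGetD p (j : Int) 0) = (j : Int)) ↔
      pvMinRep p j = true := by
  obtain ⟨a, ha0, han, hstop, hbet, hiff⟩ := pvStop hv hj
  have hstart : PySem.List.pyGetD p (j : Int) 0 = (((pvF p)^[1] j : Nat) : Int) := by
    rw [PySem.List.pyGetD_natCast, pvF_cast hv hj]
    simp
  rw [hstart, pvWalkB_run hv hj ha0 hstop hbet p.length 1 (by omega) (by omega) (by omega)]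
  rw [← hiff]
  exact ⟨by exact_mod_cast fun h => h, by exact_mod_cast fun h => h⟩
theorem pvGetD_set_true {flags : List Bool} {k x : Nat} (hx : x < flags.length) :
    ((flags.set k true).getD x false = true ↔ x = k ∨ flags.getD x false = true) := by
  rw [List.getD_eq_getElem?_getD, List.getD_eq_getElem?_getD, List.getElem?_set]
  rcases eq_or_ne k x with he | hne
  · subst he; simp [hx]
  · simp [hne, Ne.symm hne]
theorem pvWalkA_run {p : List Int} (hv : pvValidPerm p = true) {i a : Nat} (hi : i < p.length)
    (ha0 : 0 < a) (hfix : (pvF p)^[a] i = i) (hbet : ∀ t, 0 < t → t < a → i < (pvF p)^[t] i) :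
    ∀ (fuel t : Nat) (flags : List Bool) (cnt : Int), flags.length = p.length →
      0 < t → t ≤ a → a - t ≤ fuel →
      ∃ flags', pvWalkA p (i : Int) fuel flags (((pvF p)^[t] i : Nat) : Int) cnt
          = (flags', cnt + ((a - t : Nat) : Int)) ∧
        flags'.length = p.length ∧
        (∀ x, x < p.length → (flags'.getD x false = true ↔
          flags.getD x false = true ∨ ∃ s, t ≤ s ∧ s < a ∧ (pvF p)^[s] i = x)) := by
  intro fuel
  induction fuel with
  | zero =>
    intro t flags cnt hlen ht0 hta hf
    have hteq : t = a := by omega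
    subst hteq
    refine ⟨flags, by simp [pvWalkA], hlen, ?_⟩
    intro x hx
    constructor
    · intro h; exact Or.inl h
    · rintro (h | ⟨s, hs1, hs2, _⟩)
      · exact h
      · omega
  | succ fuel ih =>
    intro t flags cnt hlen ht0 hta hf
    rcases eq_or_lt_of_le hta with he | hlt
    · subst he
      rw [hfix]
      refine ⟨flags, ?_, hlen, ?_⟩
      · simp [pvWalkA]
      · intro x hx
        constructor
        · intro h; exact Or.inl h
        · rintro (h | ⟨s, hs1, hs2, _⟩)
          · exact h
          · omega
    · have hgt := hbet t ht0 hlt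
      have hne : (((pvF p)^[t] i : Nat) : Int) ≠ (i : Int) := by exact_mod_cast Nat.ne_of_gt hgt
      have hlt_n : (pvF p)^[t] i < p.length := pvIter_lt hv hi t
      simp only [pvWalkA]
      rw [if_neg hne]
      rw [show (PySem.List.pyGetD p (((pvF p)^[t] i : Nat) : Int) 0) = (((pvF p)^[t+1] i : Nat) : Int) by
        rw [PySem.List.pyGetD_natCast, pvF_cast hv hlt_n,
          show pvF p ((pvF p)^[t] i) = (pvF p)^[t+1] i from (Function.iterate_succ_apply' _ _ _).symm]]
      rw [show (((pvF p)^[t] i : Nat) : Int).toNat = (pvF p)^[t] i from Int.toNat_natCast _]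
      obtain ⟨flags', heq, hlen', hchar⟩ :=
        ih (t+1) (flags.set ((pvF p)^[t] i) true) (cnt + 1)
          (by rw [List.length_set]; exact hlen) (by omega) hlt (by omega)
      refine ⟨flags', ?_, hlen', ?_⟩
      · rw [heq]
        congr 1
        omega
      · intro x hx
        rw [hchar x hx, pvGetD_set_true (by rw [hlen]; exact hx)]
        constructor
        · rintro ((he | h) | ⟨s, hs1, hs2, hs3⟩)
          · exact Or.inr ⟨t, by omega, hlt, he.symm⟩
          · exact Or.inl h
          · exact Or.inr ⟨s, by omega, hs2, hs3⟩
        · rintro (h | ⟨s, hs1, hs2, hs3⟩)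
          · exact Or.inl (Or.inr h)
          · rcases eq_or_lt_of_le hs1 with he | hlt2
            · exact Or.inl (Or.inl (by rw [← he] at hs3; exact hs3.symm))
            · exact Or.inr ⟨s, by omega, hs2, hs3⟩
theorem pvSum_set_add_one (l : List Int) (k : Nat) (hk : k < l.length) :
    (l.set k (l.getD k 0 + 1)).sum = l.sum + 1 := by
  induction l generalizing k with
  | nil => simp at hk
  | cons x xs ih =>
    cases k with
    | zero => simp; ring
    | succ k => simp only [List.set_cons_succ, List.sum_cons, List.getD_cons_succ,
        ih k (by simpa using hk)]; ring
theorem pvALoop {p : List Int} (hv : pvValidPerm p = true) :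
    ∀ i, i ≤ p.length →
      ∃ flags t, (List.range i).foldl (pvStepA p)
          (List.replicate p.length false, List.replicate p.length 0) = (flags, t) ∧
        flags.length = p.length ∧ t.length = p.length ∧
        (∀ x, x < p.length → (flags.getD x false = true ↔ ∃ j, j < i ∧ pvInOrb p j x)) ∧
        t.sum = (((List.range i).countP (fun j => pvMinRep p j) : Nat) : Int) := by
  intro i
  induction i with
  | zero =>
    intro _
    refine ⟨_, _, rfl, by simp, by simp, ?_, by simp⟩
    intro x hx
    simp [List.getD_eq_getElem?_getD, hx]
  | succ i ih =>
    intro hi1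
    obtain ⟨flags, t, heq, hflen, htlen, hfchar, hsum⟩ := ih (by omega)
    have hi : i < p.length := by omega
    rw [List.range_succ, List.foldl_append, heq, List.foldl_cons, List.foldl_nil]
    by_cases hfi : flags.getD i false = true
    · -- skip: i already flagged, so i is not a cycle minimum
      obtain ⟨j0, hj0, horb⟩ := (hfchar i hi).mp hfi
      have hnotmin : pvMinRep p i = false := by
        rw [pvNotMinRep_iff hv hi]
        exact ⟨j0, hj0, pvInOrb_symm hv (by omega) horb⟩
      refine ⟨flags, t, ?_, hflen, htlen, ?_, ?_⟩
      · simp only [pvStepA]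
        rw [if_pos hfi]
      · intro x hx
        rw [hfchar x hx]
        constructor
        · rintro ⟨j, hj, h⟩; exact ⟨j, by omega, h⟩
        · rintro ⟨j, hj, h⟩
          rcases Nat.lt_or_ge j i with hji | hji
          · exact ⟨j, hji, h⟩
          · have : j = i := by omega
            subst this
            exact ⟨j0, hj0, pvInOrb_trans horb h⟩
      · rw [List.countP_append]
        simp [hnotmin, hsum]
    · -- process the new cycle with minimum i
      have hnfi : ¬ ∃ j, j < i ∧ pvInOrb p j i := fun h => hfi ((hfchar i hi).mpr h)
      have hmin : pvMinRep p i = true := by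
        by_contra h
        obtain ⟨x, hxi, horb⟩ := (pvNotMinRep_iff hv hi).mp (Bool.eq_false_iff.mpr h)
        exact hnfi ⟨x, hxi, pvInOrb_symm hv hi horb⟩
      obtain ⟨a, ha0, han, _, hbet, hiff⟩ := pvStop hv hi
      have hfix : (pvF p)^[a] i = i := hiff.mpr hmin
      have hstart : PySem.List.pyGetD p (i : Int) 0 = (((pvF p)^[1] i : Nat) : Int) := by
        rw [PySem.List.pyGetD_natCast, pvF_cast hv hi]; simp
      obtain ⟨flags', hweq, hflen', hwchar⟩ :=
        pvWalkA_run hv hi ha0 hfix hbet p.length 1 (flags.set i true) 1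
          (by rw [List.length_set]; exact hflen) (by omega) (by omega) (by omega)
      refine ⟨flags',
        t.set ((1 + ((a - 1 : Nat) : Int)) - 1).toNat
          (t.getD ((1 + ((a - 1 : Nat) : Int)) - 1).toNat 0 + 1), ?_, hflen', ?_, ?_, ?_⟩
      · simp only [pvStepA]
        rw [if_neg hfi, hstart, hweq]
      · rw [List.length_set]; exact htlen
      · intro x hx
        rw [hwchar x hx, pvGetD_set_true (by rw [hflen]; exact hx)]
        constructor
        · rintro ((he | h) | ⟨s, _, hs2, hs3⟩)
          · exact ⟨i, by omega, he ▸ pvInOrb_refl p i⟩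
          · obtain ⟨j, hj, ho⟩ := (hfchar x hx).mp h
            exact ⟨j, by omega, ho⟩
          · exact ⟨i, by omega, ⟨s, hs3⟩⟩
        · rintro ⟨j, hj, horb⟩
          rcases Nat.lt_or_ge j i with hji | hji
          · exact Or.inl (Or.inr ((hfchar x hx).mpr ⟨j, hji, horb⟩))
          · have : j = i := by omega
            subst this
            obtain ⟨s, hs⟩ := horb
            rcases Nat.eq_zero_or_pos (s % a) with h0 | h0
            · refine Or.inl (Or.inl ?_)
              rw [← hs, pvIter_mod ha0 hfix s, h0]
              rfl
            · refine Or.inr ⟨s % a, by omega, Nat.mod_lt s ha0, ?_⟩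
              rw [← pvIter_mod ha0 hfix s, hs]
      · have hcnt : (1 + ((a - 1 : Nat) : Int) - 1).toNat = a - 1 := by omega
        rw [hcnt, pvSum_set_add_one t (a - 1) (by omega), List.countP_append]
        simp [hmin, hsum]
theorem pvTypeOfPerm_sum {p : List Int} (hv : pvValidPerm p = true) :
    (pvTypeOfPerm p).sum =
      (((List.range p.length).countP (fun j => pvMinRep p j) : Nat) : Int) := by
  obtain ⟨flags, t, heq, _, _, _, hsum⟩ := pvALoop hv p.length (le_refl _)
  unfold pvTypeOfPerm
  rw [heq, hsum]
theorem pvA_exp {p : List Int} (hv : pvValidPerm p = true) :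
    (pvTypeOfPerm p).sum.toNat = (pvCycles p).toNat := by
  rw [pvTypeOfPerm_sum hv, pvCycles, List.countP_eq_length_filter]
theorem pvB_count {p : List Int} (hv : pvValidPerm p = true) :
    (List.range p.length).foldl
      (fun (cy : Int) (j : Nat) =>
        if pvWalkB p (j : Int) p.length (PySem.List.pyGetD p (j : Int) 0) = (j : Int)
        then cy + 1 else cy) (0 : Int) = pvCycles p := by
  rw [PySem.List.foldl_ite_add_one
    (p := fun j : Nat => pvWalkB p (j : Int) p.length (PySem.List.pyGetD p (j : Int) 0) = (j : Int))]
  have hc : ∀ j ∈ List.range p.length,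
      (decide (pvWalkB p (j : Int) p.length (PySem.List.pyGetD p (j : Int) 0) = (j : Int)))
        = pvMinRep p j := by
    intro j hj
    have hjn : j < p.length := List.mem_range.mp hj
    exact Bool.eq_iff_iff.mpr (by rw [decide_eq_true_eq]; exact pvWalkB_minrep hv hjn)
  rw [List.countP_congr (fun x hx => Bool.eq_iff_iff.mp (hc x hx)), pvCycles,
    List.countP_eq_length_filter]
  simp

-- ===== VERDICT (by name: the statement is the Claim_ definition above) =====
theorem polya_counting_spec : Claim_equal_polya_counting := by
  intro pg nc _ hpre
  obtain ⟨-, hval, -⟩ := hpre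
  show polya_counting pg nc = polya_counting_alt pg nc
  simp only [polya_counting, polya_counting_alt]
  have hA : pg.foldl (fun (acc : Int) perm => acc + nc ^ (pvTypeOfPerm perm).sum.toNat) 0
      = pg.foldl (fun (acc : Int) perm => acc + nc ^ (pvCycles perm).toNat) 0 := by
    apply PySem.List.foldl_congr_mem
    intro acc perm hm
    rw [pvA_exp (hval perm hm)]
  have hB : pg.foldl
      (fun (acc : Int) perm =>
        acc + nc ^ ((List.range perm.length).foldl
          (fun (cy : Int) (j : Nat) =>
            if pvWalkB perm (j : Int) perm.length (PySem.List.pyGetD perm (j : Int) 0) = (j : Int)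
            then cy + 1 else cy) (0 : Int)).toNat) 0
      = pg.foldl (fun (acc : Int) perm => acc + nc ^ (pvCycles perm).toNat) 0 := by
    apply PySem.List.foldl_congr_mem
    intro acc perm hm
    rw [pvB_count (hval perm hm)]
  rw [hA, hB]
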